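-- pv_equiv track=rewrite | github.com/yukioishi-eng/python-practice | basics/how_to_return_values.py | top_student
-- ===== SOURCE A (Python) =====
-- from typing import Optional
--
-- def top_student(scores: dict[str, int], passing: int) -> Optional[str]:
--     """
--     Return the name of the student with the highest score >= passing.
--     Return None if no student meets the condition.
--     """
--     passed_students = {name: score for name, score in scores.items() if score >= passing}
--
--     if not passed_students:
--         return None
--
--     max_score = max(passed_students.values())
--
--     for name, score in passed_students.items():
--         if score == max_score:
--             return name
--     """
--     条件に合う人が必ずいるとは限らない
--     Noneを返す選択肢もある
--     よって、Optionalにするのが正解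
--     """
-- ===== SOURCE B (Python) =====
-- from typing import Optional
--
-- def top_student(scores: dict[str, int], passing: int) -> Optional[str]:
--     """Single pass: keep the first passing student with a strictly higher score."""
--     best = None
--     for name, score in scores.items():
--         if score >= passing and (best is None or score > best[1]):
--             best = (name, score)
--     return None if best is None else best[0]
-- ===== Notes on version B (the rewrite author's own statement) =====
-- stated objective: simpler
-- what changed: Replaced A's three passes (filter into a new dict, max over its values, rescan for the first name at the max) by one fold over the items keeping the first passing student with a strictly greater score.
import Mathlib
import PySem

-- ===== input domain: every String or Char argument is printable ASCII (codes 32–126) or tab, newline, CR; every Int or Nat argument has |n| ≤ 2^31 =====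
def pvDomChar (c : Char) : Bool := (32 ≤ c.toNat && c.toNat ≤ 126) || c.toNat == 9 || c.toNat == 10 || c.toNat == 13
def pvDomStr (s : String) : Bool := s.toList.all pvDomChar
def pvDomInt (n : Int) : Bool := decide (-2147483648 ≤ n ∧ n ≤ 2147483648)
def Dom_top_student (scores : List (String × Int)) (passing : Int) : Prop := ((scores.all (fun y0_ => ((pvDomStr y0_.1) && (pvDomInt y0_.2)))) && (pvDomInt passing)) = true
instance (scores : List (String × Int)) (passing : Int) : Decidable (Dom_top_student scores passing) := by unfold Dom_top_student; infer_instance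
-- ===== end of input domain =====

-- B replaces A's filter-dict / max-of-values / rescan with one fold keeping the
-- first passing student with a strictly greater score (objective: simpler).

-- ===== PORT A =====
def top_student (scores : List (String × Int)) (passing : Int) : Option String :=
  -- passed_students = {name: score for name, score in scores.items() if score >= passing}
  let passed := PySem.Dict.ofList
    (((PySem.Dict.ofList scores).items).filter (fun p => decide (passing ≤ p.2)))
  if passed.items.isEmpty then none
  else
    -- max_score = max(passed_students.values())  (list is nonempty here, so max? = some _)
    match PySem.List.max? passed.values (fun v => v) with
    | none => none
    | some m =>
      -- for name, score in …: if score == max_score: return name   (falls off the end → None)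
      (passed.items.find? (fun p => p.2 == m)).map (·.1)

-- ===== PORT B =====
-- the loop body of Source B: update best when the student passes and beats it strictly
def pvStep (passing : Int) (best : Option (String × Int)) (p : String × Int) :
    Option (String × Int) :=
  if decide (passing ≤ p.2) && (match best with
                                | none => true
                                | some b => decide (b.2 < p.2)) then some p else best

def top_student_alt (scores : List (String × Int)) (passing : Int) : Option String :=
  ((((PySem.Dict.ofList scores).items).foldl (pvStep passing) none).map (·.1))

-- ===== PRECONDITION & SPEC =====
def Spec_top_student (scores : List (String × Int)) (passing : Int) (out : Option String) : Prop := out = top_student_alt scores passing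
instance (scores : List (String × Int)) (passing : Int) (out : Option String) : Decidable (Spec_top_student scores passing out) := by unfold Spec_top_student; infer_instance

-- ===== CLAIM (what is proved, stated in full; the proofs are below) =====
def Claim_equal_top_student : Prop := ∀ (scores : List (String × Int)) (passing : Int), Dom_top_student scores passing → Spec_top_student scores passing (top_student scores passing)

-- ===== LEMMAS AND PROOFS =====

-- non-passing items are skipped by B's step, so the fold only sees the filtered list
theorem foldl_step_filter (passing : Int) (L : List (String × Int))
    (acc : Option (String × Int)) :
    L.foldl (pvStep passing) acc
      = (L.filter (fun p => decide (passing ≤ p.2))).foldl (pvStep passing) acc := by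
  induction L generalizing acc with
  | nil => rfl
  | cons p L ih =>
    by_cases h : passing ≤ p.2
    · simp [h, ih]
    · have : pvStep passing acc p = acc := by
        simp [pvStep, h]
      simp [h, List.foldl_cons, this, ih]

-- over a list of passing students, B's fold finds the first element at the running maximum
theorem foldl_step_find (passing : Int) (Q : List (String × Int)) (b : String × Int)
    (hQ : ∀ p ∈ Q, passing ≤ p.2) :
    Q.foldl (pvStep passing) (some b)
      = (b :: Q).find? (fun p => p.2 == (Q.map (·.2)).foldl max b.2) := by
  induction Q generalizing b with
  | nil => simp [List.find?]
  | cons p Q ih =>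
    have hp : passing ≤ p.2 := hQ p (List.mem_cons_self ..)
    have hQ' : ∀ q ∈ Q, passing ≤ q.2 := fun q hq => hQ q (List.mem_cons_of_mem _ hq)
    by_cases hlt : b.2 < p.2
    · have hstep : pvStep passing (some b) p = some p := by simp [pvStep, hp, hlt]
      have hmax : max b.2 p.2 = p.2 := max_eq_right hlt.le
      have hM : p.2 ≤ (Q.map (·.2)).foldl max p.2 :=
        (PySem.List.le_foldl_max (Q.map (·.2)) p.2).1
      have hbne : (b.2 == (Q.map (·.2)).foldl max p.2) = false := by
        simp only [beq_eq_false_iff_ne, ne_eq]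
        intro h; omega
      rw [List.foldl_cons, hstep, ih p hQ']
      simp only [List.map_cons, List.foldl_cons, hmax]
      have hskip : (b :: p :: Q).find? (fun q => q.2 == (Q.map (·.2)).foldl max p.2)
          = (p :: Q).find? (fun q => q.2 == (Q.map (·.2)).foldl max p.2) :=
        List.find?_cons_of_neg (by simp only [beq_iff_eq]; omega)
      rw [hskip]
    · have hstep : pvStep passing (some b) p = some b := by simp [pvStep, hp, hlt]
      have hle : p.2 ≤ b.2 := by omega
      have hmax : max b.2 p.2 = b.2 := max_eq_left hle
      rw [List.foldl_cons, hstep, ih b hQ']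
      simp only [List.map_cons, List.foldl_cons, hmax]
      by_cases hb : b.2 = (Q.map (·.2)).foldl max b.2
      · have h1 : (b :: Q).find? (fun q => q.2 == (Q.map (·.2)).foldl max b.2) = some b :=
          List.find?_cons_of_pos (by simp only [beq_iff_eq]; exact hb)
        have h2 : (b :: p :: Q).find? (fun q => q.2 == (Q.map (·.2)).foldl max b.2) = some b :=
          List.find?_cons_of_pos (by simp only [beq_iff_eq]; exact hb)
        rw [h1, h2]
      · have hbM : b.2 < (Q.map (·.2)).foldl max b.2 :=
          lt_of_le_of_ne ((PySem.List.le_foldl_max (Q.map (·.2)) b.2).1) hb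
        have h1 : (b :: p :: Q).find? (fun q => q.2 == (Q.map (·.2)).foldl max b.2)
            = (p :: Q).find? (fun q => q.2 == (Q.map (·.2)).foldl max b.2) :=
          List.find?_cons_of_neg (by simp only [beq_iff_eq]; omega)
        have h2 : (p :: Q).find? (fun q => q.2 == (Q.map (·.2)).foldl max b.2)
            = Q.find? (fun q => q.2 == (Q.map (·.2)).foldl max b.2) :=
          List.find?_cons_of_neg (by simp only [beq_iff_eq]; omega)
        have h3 : (b :: Q).find? (fun q => q.2 == (Q.map (·.2)).foldl max b.2)
            = Q.find? (fun q => q.2 == (Q.map (·.2)).foldl max b.2) :=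
          List.find?_cons_of_neg (by simp only [beq_iff_eq]; omega)
        rw [h1, h2, h3]

-- the comprehension's dict has exactly the filtered items (its keys are distinct)
theorem items_passed (scores : List (String × Int)) (passing : Int) :
    (PySem.Dict.ofList
      (((PySem.Dict.ofList scores).items).filter (fun p => decide (passing ≤ p.2)))).items
    = ((PySem.Dict.ofList scores).items).filter (fun p => decide (passing ≤ p.2)) := by
  set L := ((PySem.Dict.ofList scores).items).filter (fun p => decide (passing ≤ p.2)) with hL
  have hnd : (L.map Prod.fst).Nodup := by
    have hsub : (L.map Prod.fst).Sublist ((PySem.Dict.ofList scores).items.map Prod.fst) :=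
      List.filter_sublist.map Prod.fst
    exact (PySem.Dict.nodup_keys_ofList scores).sublist hsub
  have := PySem.Dict.items_foldl_insert_fresh L Prod.fst Prod.snd PySem.Dict.empty
    (fun a _ => by simp [PySem.Dict.contains_empty]) hnd
  simpa [PySem.Dict.ofList, PySem.Dict.update] using this

-- ===== VERDICT (by name: the statement is the Claim_ definition above) =====
theorem top_student_spec : Claim_equal_top_student := by
  intro scores passing _
  simp only [Spec_top_student, top_student, top_student_alt]
  rw [foldl_step_filter]
  have hit := items_passed scores passing
  cases hF : ((PySem.Dict.ofList scores).items).filter (fun p => decide (passing ≤ p.2)) with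
  | nil =>
    rw [hF] at hit
    simp [hit]
  | cons h t =>
    rw [hF] at hit
    have hpass : ∀ p ∈ h :: t, passing ≤ p.2 := by
      intro p hp
      rw [← hF] at hp
      simpa using List.of_mem_filter hp
    have hph : passing ≤ h.2 := hpass h (List.mem_cons_self ..)
    have hpt : ∀ p ∈ t, passing ≤ p.2 := fun p hp => hpass p (List.mem_cons_of_mem _ hp)
    have hstep0 : pvStep passing none h = some h := by simp [pvStep, hph]
    have hv : (PySem.Dict.ofList (h :: t)).values = h.2 :: t.map (·.2) := by
      simp only [PySem.Dict.values, hit, List.map_cons]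
    simp only [hit, List.isEmpty_cons, List.foldl_cons, hstep0, Bool.false_eq_true, if_false]
    rw [hv, PySem.List.max?_id_cons, List.foldl_map]
    rw [foldl_step_find passing t h hpt, List.foldl_map]
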